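-- pv_equiv track=rewrite | github.com/joaomeller11/-inteligencia-artificial | lights_out.py | gulosa
-- ===== SOURCE A (Python) =====
-- import copy
--
-- movimentos = [(-1,0),(1,0),(0,-1),(0,1),(0,0)]
--
-- def alternar(tabuleiro, x, y):
--     n = len(tabuleiro)
--     novo = copy.deepcopy(tabuleiro)
--     for dx, dy in movimentos:
--         nx, ny = x+dx, y+dy
--         if 0 <= nx < n and 0 <= ny < n:
--             novo[nx][ny] ^= 1
--     return novo
--
-- def objetivo(tabuleiro):
--     return all(celula == 1 for linha in tabuleiro for celula in linha)
--
-- def heuristica(tabuleiro):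
--     return sum(celula == 0 for linha in tabuleiro for celula in linha)
--
-- def gulosa(inicial):
--     tabuleiro = inicial
--     caminho = []
--     n = len(tabuleiro)
--
--     for _ in range(50):
--         if objetivo(tabuleiro):
--             return caminho
--
--         melhor = None
--         melhor_h = float('inf')
--
--         for i in range(n):
--             for j in range(n):
--                 novo = alternar(tabuleiro,i,j)
--                 h = heuristica(novo)
--                 if h < melhor_h:
--                     melhor_h = h
--                     melhor = (i,j,novo)
--
--         if melhor:
--             i,j,tabuleiro = melhor
--             caminho.append((i,j))
--
--     return None
-- ===== SOURCE B (Python) =====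
-- movimentos = [(-1,0),(1,0),(0,-1),(0,1),(0,0)]
--
-- def gulosa(inicial):
--     # Incremental greedy: keeps a running zero-count and scores each candidate
--     # move in O(1) from the up-to-5 toggled cells; applies the chosen move in
--     # place on a private copy (the caller's board is never mutated).
--     tab = [list(linha) for linha in inicial]
--     n = len(tab)
--     z = sum(c == 0 for linha in tab for c in linha)
--     caminho = []
--     for _ in range(50):
--         if all(c == 1 for linha in tab for c in linha):
--             return caminho
--         best = None  # (h, i, j)
--         for i in range(n):
--             for j in range(n):
--                 d = 0
--                 for dx, dy in movimentos:
--                     x, y = i + dx, j + dy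
--                     if 0 <= x < n and 0 <= y < n:
--                         c = tab[x][y]
--                         if c == 1:
--                             d += 1
--                         elif c == 0:
--                             d -= 1
--                 h = z + d
--                 if best is None or h < best[0]:
--                     best = (h, i, j)
--         h, i, j = best
--         for dx, dy in movimentos:
--             x, y = i + dx, j + dy
--             if 0 <= x < n and 0 <= y < n:
--                 tab[x][y] ^= 1
--         z = h
--         caminho.append((i, j))
--     return None
-- ===== Notes on version B (the rewrite author's own statement) =====
-- stated objective: faster
-- what changed: Instead of rebuilding a deep copy of the board and rescanning all n^2 cells for every one of the n^2 candidate moves, B keeps a running zero-count and scores each candidate in O(1) from the at-most-5 cells the move toggles, then applies the chosen move in place on a private copy.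
import Mathlib
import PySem

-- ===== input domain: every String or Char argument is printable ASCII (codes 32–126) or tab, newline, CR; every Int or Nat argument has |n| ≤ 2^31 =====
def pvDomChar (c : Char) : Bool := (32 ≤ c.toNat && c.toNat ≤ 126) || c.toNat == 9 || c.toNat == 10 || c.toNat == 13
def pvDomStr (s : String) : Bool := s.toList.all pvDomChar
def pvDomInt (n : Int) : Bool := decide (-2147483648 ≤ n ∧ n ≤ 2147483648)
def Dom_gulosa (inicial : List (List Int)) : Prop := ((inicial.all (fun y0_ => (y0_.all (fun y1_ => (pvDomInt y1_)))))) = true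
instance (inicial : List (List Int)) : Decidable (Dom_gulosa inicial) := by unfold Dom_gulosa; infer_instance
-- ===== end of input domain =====

-- B replaces A's deep-copy-and-full-rescan scoring of every candidate move by an
-- incremental delta computed from the ≤5 toggled cells plus a running zero-count (faster).
-- Neither program mutates the caller's board: B works on a private copy.

-- ===== PORT A =====

-- Python `v ^ 1` on an int flips the last bit: v+1 for even v, v-1 for odd v (exact for all ints).
def pyxor1 (v : Int) : Int := if v % 2 = 0 then v + 1 else v - 1

def movimentos : List (Int × Int) := [(-1,0),(1,0),(0,-1),(0,1),(0,0)]

-- indices are in range on every input admitted by Pre_gulosa; Python raises IndexError exactly where they are not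
def alternar (t : List (List Int)) (x y : Int) : List (List Int) :=
  movimentos.foldl (fun novo d =>
    let nx := x + d.1
    let ny := y + d.2
    if 0 ≤ nx ∧ nx < (t.length : Int) ∧ 0 ≤ ny ∧ ny < (t.length : Int) then
      novo.modify nx.toNat (fun row => row.modify ny.toNat pyxor1)
    else novo) t

def objetivo (t : List (List Int)) : Bool :=
  t.all (fun r => r.all (fun c => c == 1))

def heuristica (t : List (List Int)) : Int :=
  t.foldl (fun a r => r.foldl (fun a c => a + (if c = 0 then 1 else 0)) a) 0

-- the inner double scan: best (melhor_h, i, j, novo); the `melhor = None` / `float('inf')` start is the `none` state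
def gulosaScan (t : List (List Int)) : Option (Int × Int × Int × List (List Int)) :=
  (List.range t.length).foldl (fun st i =>
    (List.range t.length).foldl (fun st j =>
      let novo := alternar t (i : Int) (j : Int)
      let h := heuristica novo
      match st with
      | none => some (h, (i : Int), (j : Int), novo)
      | some b => if h < b.1 then some (h, (i : Int), (j : Int), novo) else some b) st) none

def gulosaLoop : Nat → List (List Int) → List (Int × Int) → Option (List (Int × Int))
  | 0, _, _ => none
  | f+1, t, caminho =>
    if objetivo t then some caminho
    else
      match gulosaScan t with
      | some (_, i, j, novo) => gulosaLoop f novo (caminho ++ [(i, j)])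
      | none => gulosaLoop f t caminho

def gulosa (inicial : List (List Int)) : Option (List (Int × Int)) :=
  gulosaLoop 50 inicial []

-- ===== PORT B =====

-- the O(1) score change a move at (i,j) causes to the zero-count: reads only the ≤5 toggled cells
def bDelta (t : List (List Int)) (i j : Int) : Int :=
  movimentos.foldl (fun d p =>
    let x := i + p.1
    let y := j + p.2
    if 0 ≤ x ∧ x < (t.length : Int) ∧ 0 ≤ y ∧ y < (t.length : Int) then
      d + (let c := (t.getD x.toNat []).getD y.toNat 0
           if c = 1 then 1 else if c = 0 then -1 else 0)
    else d) 0

-- apply the chosen move (B's in-place toggle loop on its private copy)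
def bApply (t : List (List Int)) (i j : Int) : List (List Int) :=
  movimentos.foldl (fun tb p =>
    let x := i + p.1
    let y := j + p.2
    if 0 ≤ x ∧ x < (t.length : Int) ∧ 0 ≤ y ∧ y < (t.length : Int) then
      tb.modify x.toNat (fun row => row.modify y.toNat pyxor1)
    else tb) t

def bScan (t : List (List Int)) (z : Int) : Option (Int × Int × Int) :=
  (List.range t.length).foldl (fun st i =>
    (List.range t.length).foldl (fun st j =>
      let h := z + bDelta t (i : Int) (j : Int)
      match st with
      | none => some (h, (i : Int), (j : Int))
      | some b => if h < b.1 then some (h, (i : Int), (j : Int)) else some b) st) none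

def gulosaAltLoop : Nat → List (List Int) → Int → List (Int × Int) → Option (List (Int × Int))
  | 0, _, _, _ => none
  | f+1, t, z, caminho =>
    if t.all (fun r => r.all (fun c => c == 1)) then some caminho
    else
      match bScan t z with
      | some (h, i, j) => gulosaAltLoop f (bApply t i j) h (caminho ++ [(i, j)])
      | none => gulosaAltLoop f t z caminho   -- unreachable: the scan is empty only for the empty board, which is the goal

def gulosa_alt (inicial : List (List Int)) : Option (List (Int × Int)) :=
  gulosaAltLoop 50 inicial
    (inicial.foldl (fun a r => r.foldl (fun a c => a + (if c = 0 then 1 else 0)) a) 0) []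

-- ===== PRECONDITION & SPEC =====

-- Pre_ excludes exactly the boards on which A raises IndexError: a board that is not
-- already all ones and has some row shorter than the number of rows (the first full scan
-- toggles every cell (i,j) with i,j < len(board)). B raises there too.
def Pre_gulosa (inicial : List (List Int)) : Prop :=
  (∀ r ∈ inicial, inicial.length ≤ r.length) ∨ (∀ r ∈ inicial, ∀ c ∈ r, c = 1)

instance (inicial : List (List Int)) : Decidable (Pre_gulosa inicial) := by
  unfold Pre_gulosa; infer_instance

def pvWitness_gulosa : List (List Int) := [[0, 1], [1, 1]]

def Spec_gulosa (inicial : List (List Int)) (out : Option (List (Int × Int))) : Prop := out = gulosa_alt inicial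
instance (inicial : List (List Int)) (out : Option (List (Int × Int))) : Decidable (Spec_gulosa inicial out) := by unfold Spec_gulosa; infer_instance

-- ===== CLAIM (what is proved, stated in full; the proofs are below) =====
def Claim_equal_gulosa : Prop := ∀ (inicial : List (List Int)), Dom_gulosa inicial → Pre_gulosa inicial → Spec_gulosa inicial (gulosa inicial)

-- ===== LEMMAS AND PROOFS =====

-- board shape: every row at least as long as the number of rows
def Shape (t : List (List Int)) : Prop := ∀ k, k < t.length → t.length ≤ (t.getD k []).length

def indB (c : Int) : Int := if c = 1 then 1 else if c = 0 then -1 else 0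

def cell (t : List (List Int)) (x y : Nat) : Int := (t.getD x []).getD y 0

def rowZ (r : List Int) : Int := (r.map (fun c => if c = 0 then (1:Int) else 0)).sum

theorem foldl_add_g {α : Type} (g : α → Int) :
    ∀ (l : List α) (a : Int), l.foldl (fun a x => a + g x) a = a + (l.map g).sum := by
  intro l
  induction l with
  | nil => intro a; simp
  | cons x xs ih => intro a; simp [List.foldl_cons, ih]; ring

theorem heuristica_foldl :
    ∀ (t : List (List Int)) (a : Int),
      t.foldl (fun a r => r.foldl (fun a c => a + (if c = 0 then 1 else 0)) a) a
        = a + (t.map rowZ).sum := by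
  intro t
  induction t with
  | nil => intro a; simp
  | cons r rs ih =>
    intro a
    simp only [List.foldl_cons, List.map_cons, List.sum_cons]
    rw [foldl_add_g (fun c => if c = 0 then (1:Int) else 0) r a, ih]
    simp only [rowZ]
    ring

theorem heuristica_eq (t : List (List Int)) : heuristica t = (t.map rowZ).sum := by
  unfold heuristica
  simpa using heuristica_foldl t 0

theorem ind_pyxor (c : Int) :
    (if pyxor1 c = 0 then (1:Int) else 0) = (if c = 0 then (1:Int) else 0) + indB c := by
  unfold pyxor1 indB
  split_ifs <;> omega

theorem rowZ_modify (r : List Int) (y : Nat) (hy : y < r.length) :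
    rowZ (r.modify y pyxor1) = rowZ r + indB (r.getD y 0) := by
  induction r generalizing y with
  | nil => simp at hy
  | cons c cs ih =>
    cases y with
    | zero => simp [rowZ, List.modify_zero_cons, List.getD, ind_pyxor c]; ring
    | succ y' =>
      have hy' : y' < cs.length := by simpa using hy
      rw [List.modify_succ_cons]
      simp only [rowZ, List.map_cons, List.sum_cons] at *
      rw [ih y' hy']
      simp [List.getD]; ring

theorem Z_modify (t : List (List Int)) (x y : Nat) (hx : x < t.length)
    (hy : y < (t.getD x []).length) :
    heuristica (t.modify x (fun r => r.modify y pyxor1)) = heuristica t + indB (cell t x y) := by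
  induction t generalizing x with
  | nil => simp at hx
  | cons r rs ih =>
    cases x with
    | zero =>
      rw [List.modify_zero_cons]
      simp only [heuristica_eq, List.map_cons, List.sum_cons, cell]
      rw [rowZ_modify r y (by simpa [List.getD] using hy)]
      simp [List.getD]; ring
    | succ x' =>
      have hx' : x' < rs.length := by simpa using hx
      have hy' : y < (rs.getD x' []).length := by simpa [List.getD] using hy
      have hrec := ih x' hx' hy'
      rw [List.modify_succ_cons]
      simp only [heuristica_eq, List.map_cons, List.sum_cons, cell] at hrec ⊢
      rw [hrec]
      simp [List.getD]; ring

theorem getD_row_modify_ne (r : List Int) (y y' : Nat) (hyy : y ≠ y') :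
    (r.modify y pyxor1).getD y' 0 = r.getD y' 0 := by
  rw [List.getD_eq_getElem?_getD, List.getD_eq_getElem?_getD, List.getElem?_modify]
  cases r[y']? <;> simp [hyy]

theorem getD_board_modify_ne (t : List (List Int)) (x x' : Nat) (g : List Int → List Int)
    (hx : x ≠ x') : (t.modify x g).getD x' [] = t.getD x' [] := by
  rw [List.getD_eq_getElem?_getD, List.getD_eq_getElem?_getD, List.getElem?_modify]
  cases t[x']? <;> simp [hx]

theorem getD_board_modify_self (t : List (List Int)) (x : Nat) (g : List Int → List Int)
    (hg : g [] = []) : (t.modify x g).getD x [] = g (t.getD x []) := by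
  rw [List.getD_eq_getElem?_getD, List.getD_eq_getElem?_getD, List.getElem?_modify]
  cases t[x]? <;> simp [hg]

theorem cell_modify_ne (t : List (List Int)) (x y x' y' : Nat)
    (h : (x, y) ≠ (x', y')) :
    cell (t.modify x (fun r => r.modify y pyxor1)) x' y' = cell t x' y' := by
  unfold cell
  by_cases hx : x = x'
  · subst hx
    have hyy : y ≠ y' := by intro he; exact h (by rw [he])
    rw [getD_board_modify_self t x _ (by simp), getD_row_modify_ne _ _ _ hyy]
  · rw [getD_board_modify_ne t x x' _ hx]

theorem length_modify_board (t : List (List Int)) (x y : Nat) (k : Nat) :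
    ((t.modify x (fun r => r.modify y pyxor1)).getD k []).length = (t.getD k []).length := by
  rw [List.getD_eq_getElem?_getD, List.getD_eq_getElem?_getD, List.getElem?_modify]
  cases ht : t[k]? with
  | none => simp
  | some r => by_cases hx : x = k <;> simp [hx]

-- the core: toggling a pairwise-distinct set of in-range cells changes the zero-count by
-- the sum of the per-cell deltas read off the ORIGINAL board
theorem toggle_delta (i j : Int) :
    ∀ (ms : List (Int × Int)) (t : List (List Int)) (N : Int),
      (t.length : Int) = N →
      Shape t →
      ms.Pairwise (fun p q => (i + p.1, j + p.2) ≠ (i + q.1, j + q.2)) →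
      heuristica (ms.foldl (fun nv p =>
          if 0 ≤ i + p.1 ∧ i + p.1 < N ∧ 0 ≤ j + p.2 ∧ j + p.2 < N then
            nv.modify (i + p.1).toNat (fun row => row.modify (j + p.2).toNat pyxor1)
          else nv) t)
        = heuristica t + (ms.map (fun p =>
            if 0 ≤ i + p.1 ∧ i + p.1 < N ∧ 0 ≤ j + p.2 ∧ j + p.2 < N then
              indB (cell t (i + p.1).toNat (j + p.2).toNat) else 0)).sum := by
  intro ms
  induction ms with
  | nil => intro t N _ _ _; simp
  | cons p ps ih =>
    intro t N hN hsh hpw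
    have hhd := (List.pairwise_cons.mp hpw).1
    have hpw' := (List.pairwise_cons.mp hpw).2
    by_cases hc : 0 ≤ i + p.1 ∧ i + p.1 < N ∧ 0 ≤ j + p.2 ∧ j + p.2 < N
    · have hxlt : (i + p.1).toNat < t.length := by omega
      have hylt : (j + p.2).toNat < (t.getD (i + p.1).toNat []).length := by
        have := hsh _ hxlt; omega
      simp only [List.foldl_cons, if_pos hc, List.map_cons, List.sum_cons, if_pos hc]
      rw [ih (t.modify (i + p.1).toNat (fun row => row.modify (j + p.2).toNat pyxor1)) N
          (by rw [List.length_modify]; exact hN)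
          (by intro k hk
              rw [List.length_modify] at hk ⊢
              rw [length_modify_board]
              exact hsh k hk)
          hpw']
      have hcells : ∀ q ∈ ps,
          (if 0 ≤ i + q.1 ∧ i + q.1 < N ∧ 0 ≤ j + q.2 ∧ j + q.2 < N then
            indB (cell (t.modify (i + p.1).toNat (fun row => row.modify (j + p.2).toNat pyxor1))
              (i + q.1).toNat (j + q.2).toNat) else 0)
          = (if 0 ≤ i + q.1 ∧ i + q.1 < N ∧ 0 ≤ j + q.2 ∧ j + q.2 < N then
            indB (cell t (i + q.1).toNat (j + q.2).toNat) else 0) := by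
        intro q hq
        by_cases hcq : 0 ≤ i + q.1 ∧ i + q.1 < N ∧ 0 ≤ j + q.2 ∧ j + q.2 < N
        · simp only [if_pos hcq]
          congr 1
          apply cell_modify_ne
          intro heq
          apply hhd q hq
          have h1 := congrArg Prod.fst heq
          have h2 := congrArg Prod.snd heq
          simp only at h1 h2
          have e1 : i + p.1 = i + q.1 := by omega
          have e2 : j + p.2 = j + q.2 := by omega
          rw [e1, e2]
        · simp [hcq]
      rw [List.map_congr_left hcells]
      rw [Z_modify t _ _ hxlt hylt]
      ring
    · simp only [List.foldl_cons, if_neg hc, List.map_cons, List.sum_cons, if_neg hc]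
      rw [ih t N hN hsh hpw']
      ring

theorem mov_pairwise (i j : Int) :
    movimentos.Pairwise (fun p q => (i + p.1, j + p.2) ≠ (i + q.1, j + q.2)) := by
  refine List.pairwise_iff_getElem.mpr ?_
  intro a b ha hb hab
  simp only [movimentos, List.length_cons, List.length_nil] at ha hb
  interval_cases a <;> interval_cases b <;>
    simp only [movimentos, List.getElem_cons_zero, List.getElem_cons_succ] <;>
    (intro he; rw [Prod.ext_iff] at he; simp only [] at he; omega)

theorem foldl_condadd {α : Type} (C : α → Prop) [DecidablePred C] (g : α → Int) :
    ∀ (l : List α) (a : Int),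
      l.foldl (fun d x => if C x then d + g x else d) a
        = a + (l.map (fun x => if C x then g x else 0)).sum := by
  intro l
  induction l with
  | nil => intro a; simp
  | cons x xs ih =>
    intro a
    by_cases hc : C x <;> simp [List.foldl_cons, hc, ih] <;> ring

theorem h_key (t : List (List Int)) (hsh : Shape t) (i j : Int) :
    heuristica (alternar t i j) = heuristica t + bDelta t i j := by
  have hb : bDelta t i j = (movimentos.map (fun p =>
      if 0 ≤ i + p.1 ∧ i + p.1 < (t.length : Int) ∧ 0 ≤ j + p.2 ∧ j + p.2 < (t.length : Int) then
        indB (cell t (i + p.1).toNat (j + p.2).toNat) else 0)).sum := by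
    have hdef : bDelta t i j = movimentos.foldl (fun d p =>
        if 0 ≤ i + p.1 ∧ i + p.1 < (t.length : Int) ∧ 0 ≤ j + p.2 ∧ j + p.2 < (t.length : Int) then
          d + indB (cell t (i + p.1).toNat (j + p.2).toNat)
        else d) 0 := rfl
    rw [hdef, foldl_condadd (fun p : Int × Int =>
        0 ≤ i + p.1 ∧ i + p.1 < (t.length : Int) ∧ 0 ≤ j + p.2 ∧ j + p.2 < (t.length : Int))
        (fun p => indB (cell t (i + p.1).toNat (j + p.2).toNat)) movimentos 0]
    simp
  rw [hb]
  exact toggle_delta i j movimentos t (t.length : Int) rfl hsh (mov_pairwise i j)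

-- shape and length are preserved by the toggle fold (both alternar and bApply have this form)
theorem fold_mod_shape (i j N : Int) :
    ∀ (ms : List (Int × Int)) (t : List (List Int)),
      (ms.foldl (fun nv p =>
          if 0 ≤ i + p.1 ∧ i + p.1 < N ∧ 0 ≤ j + p.2 ∧ j + p.2 < N then
            nv.modify (i + p.1).toNat (fun row => row.modify (j + p.2).toNat pyxor1)
          else nv) t).length = t.length
      ∧ (Shape t → Shape (ms.foldl (fun nv p =>
          if 0 ≤ i + p.1 ∧ i + p.1 < N ∧ 0 ≤ j + p.2 ∧ j + p.2 < N then
            nv.modify (i + p.1).toNat (fun row => row.modify (j + p.2).toNat pyxor1)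
          else nv) t)) := by
  intro ms
  induction ms with
  | nil => intro t; exact ⟨rfl, fun h => h⟩
  | cons p ps ih =>
    intro t
    by_cases hc : 0 ≤ i + p.1 ∧ i + p.1 < N ∧ 0 ≤ j + p.2 ∧ j + p.2 < N
    · simp only [List.foldl_cons, if_pos hc]
      refine ⟨by rw [(ih _).1, List.length_modify], fun hsh => ?_⟩
      refine (ih _).2 ?_
      intro k hk
      rw [List.length_modify] at hk ⊢
      rw [length_modify_board]
      exact hsh k hk
    · simp only [List.foldl_cons, if_neg hc]
      exact ih t

theorem shape_alternar (t : List (List Int)) (i j : Int) (hsh : Shape t) :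
    Shape (alternar t i j) :=
  (fold_mod_shape i j (t.length : Int) movimentos t).2 hsh

-- relation between the two scan states
def ScanRel (t : List (List Int)) :
    Option (Int × Int × Int × List (List Int)) → Option (Int × Int × Int) → Prop
  | none, none => True
  | some (h, i, j, novo), some (h', i', j') =>
      h' = h ∧ i' = i ∧ j' = j ∧ novo = alternar t i j ∧ h = heuristica novo
  | _, _ => False

theorem inner_rel (t : List (List Int)) (hsh : Shape t) (i : Nat) :
    ∀ (js : List Nat) (stA : Option (Int × Int × Int × List (List Int)))
      (stB : Option (Int × Int × Int)), ScanRel t stA stB →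
      ScanRel t
        (js.foldl (fun st j =>
          let novo := alternar t (i : Int) (j : Int)
          let h := heuristica novo
          match st with
          | none => some (h, (i : Int), (j : Int), novo)
          | some b => if h < b.1 then some (h, (i : Int), (j : Int), novo) else some b) stA)
        (js.foldl (fun st j =>
          let h := heuristica t + bDelta t (i : Int) (j : Int)
          match st with
          | none => some (h, (i : Int), (j : Int))
          | some b => if h < b.1 then some (h, (i : Int), (j : Int)) else some b) stB) := by
  intro js
  induction js with
  | nil => intro stA stB hrel; exact hrel
  | cons j js ihj =>
    intro stA stB hrel
    simp only [List.foldl_cons]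
    apply ihj
    have hk : heuristica t + bDelta t (i : Int) (j : Int) = heuristica (alternar t (i : Int) (j : Int)) :=
      (h_key t hsh (i : Int) (j : Int)).symm
    cases stA with
    | none =>
      cases stB with
      | none =>
        show ScanRel t (some _) (some _)
        exact ⟨hk, rfl, rfl, rfl, rfl⟩
      | some b => exact absurd hrel (by cases b with | mk h b' => cases b' with | mk i' j' => exact fun h => h)
    | some a =>
      obtain ⟨ha, ia, ja, nova⟩ := a
      cases stB with
      | none => exact absurd hrel (fun h => h)
      | some b =>
        obtain ⟨hb, ib, jb⟩ := b
        obtain ⟨e1, e2, e3, e4, e5⟩ := hrel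
        subst e1 e2 e3
        dsimp only
        rw [hk]
        by_cases hlt : heuristica (alternar t (i : Int) (j : Int)) < hb
        · simp only [if_pos hlt]
          exact ⟨rfl, rfl, rfl, rfl, rfl⟩
        · simp only [if_neg hlt]
          exact ⟨rfl, rfl, rfl, e4, e5⟩

theorem outer_rel (t : List (List Int)) (hsh : Shape t) :
    ∀ (is : List Nat) (stA : Option (Int × Int × Int × List (List Int)))
      (stB : Option (Int × Int × Int)), ScanRel t stA stB →
      ScanRel t
        (is.foldl (fun st i =>
          (List.range t.length).foldl (fun st j =>
            let novo := alternar t (i : Int) (j : Int)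
            let h := heuristica novo
            match st with
            | none => some (h, (i : Int), (j : Int), novo)
            | some b => if h < b.1 then some (h, (i : Int), (j : Int), novo) else some b) st) stA)
        (is.foldl (fun st i =>
          (List.range t.length).foldl (fun st j =>
            let h := heuristica t + bDelta t (i : Int) (j : Int)
            match st with
            | none => some (h, (i : Int), (j : Int))
            | some b => if h < b.1 then some (h, (i : Int), (j : Int)) else some b) st) stB) := by
  intro is
  induction is with
  | nil => intro stA stB hrel; exact hrel
  | cons i is ihi =>
    intro stA stB hrel
    simp only [List.foldl_cons]
    exact ihi _ _ (inner_rel t hsh i (List.range t.length) stA stB hrel)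

theorem scan_rel (t : List (List Int)) (hsh : Shape t) :
    ScanRel t (gulosaScan t) (bScan t (heuristica t)) :=
  outer_rel t hsh (List.range t.length) none none trivial

theorem loop_eq : ∀ (f : Nat) (t : List (List Int)) (caminho : List (Int × Int)),
    (objetivo t = true ∨ Shape t) →
    gulosaLoop f t caminho = gulosaAltLoop f t (heuristica t) caminho := by
  intro f
  induction f with
  | zero => intro t caminho _; rfl
  | succ f ih =>
    intro t caminho hh
    show (if objetivo t then some caminho else _) = (if t.all (fun r => r.all (fun c => c == 1)) then some caminho else _)
    have hobj : (t.all (fun r => r.all (fun c => c == 1))) = objetivo t := rfl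
    rw [hobj]
    by_cases hg : objetivo t = true
    · simp only [if_pos hg]
    · simp only [if_neg hg]
      have hsh : Shape t := hh.resolve_left hg
      have hrel := scan_rel t hsh
      cases hA : gulosaScan t with
      | none =>
        cases hB : bScan t (heuristica t) with
        | none => exact ih t caminho (Or.inr hsh)
        | some b =>
          rw [hA, hB] at hrel
          exact absurd hrel (by cases b with | mk h b' => cases b' with | mk i' j' => exact fun h => h)
      | some a =>
        obtain ⟨ha, ia, ja, nova⟩ := a
        cases hB : bScan t (heuristica t) with
        | none => rw [hA, hB] at hrel; exact absurd hrel (fun h => h)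
        | some b =>
          obtain ⟨hb, ib, jb⟩ := b
          rw [hA, hB] at hrel
          obtain ⟨e1, e2, e3, e4, e5⟩ := hrel
          subst e1 e2 e3
          dsimp only
          have hba : bApply t ib jb = alternar t ib jb := rfl
          rw [hba, ← e4, e5]
          exact ih nova (caminho ++ [(ib, jb)]) (Or.inr (e4 ▸ shape_alternar t ib jb hsh))

-- ===== VERDICT (by name: the statement is the Claim_ definition above) =====
theorem gulosa_spec : Claim_equal_gulosa := by
  intro inicial _hdom hpre
  unfold Spec_gulosa
  show gulosaLoop 50 inicial [] = gulosaAltLoop 50 inicial _ []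
  have hz : (inicial.foldl (fun a r => r.foldl (fun a c => a + (if c = 0 then 1 else 0)) a) 0)
      = heuristica inicial := rfl
  rw [hz]
  apply loop_eq
  rcases hpre with h | h
  · right
    intro k hk
    apply h
    rw [List.getD_eq_getElem?_getD, List.getElem?_eq_getElem hk]
    exact List.getElem_mem hk
  · left
    simp only [objetivo, List.all_eq_true]
    intro r hr c hc
    simpa using h r hr c hc
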